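-- pv_equiv track=rewrite | github.com/Ruslan1351/AOIS | lab3/lab3_functions.py | calc_table_minim_snf
-- ===== SOURCE A (Python) =====
-- from itertools import permutations
--
-- def is_implicant_extra(all_const_X, implic_X):
--     new_const_X = all_const_X[:]
--     for i in range(len(implic_X)):
--         new_const_X[i] -= implic_X[i]
--     if all(number_of_X > 0 for number_of_X in new_const_X):
--         return True
--     else:
--         return False
--
-- def calc_table_is_implicant_extra(table, impl_index):
--     all_const_X = [0 for _ in range(len(table[0]))]
--     for i in range(len(table[0])):
--         for j in range(len(table)):
--             if table[j][i] == 'X':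
--                 all_const_X[i] += 1
--     implic_X = [0 for _ in range(len(table[impl_index]))]
--     for i in range(len(table[impl_index])):
--         if table[impl_index][i] == 'X':
--             implic_X[i] += 1
--     if is_implicant_extra(all_const_X, implic_X):
--         return True
--     else:
--         return False
--
-- def calc_table_check_implic_snf(table, implicants):
--     new_table = table[:]
--     extra_implicants = list()
--     index = 0
--     for i in range(len(implicants)):
--         if calc_table_is_implicant_extra(new_table, index):
--             new_table.pop(index)
--             extra_implicants.append(implicants[i])
--         else:
--             index += 1
--     return extra_implicants
--
-- def find_minim_snf_from_all_snf(all_snf):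
--     keys = list(all_snf.keys())
--     min = all_snf[keys[0]]
--     minim_snf = keys[0]
--     for key in keys:
--         if all_snf[key] < min:
--             min = all_snf[key]
--             minim_snf = key
--     return minim_snf
--
-- def create_new_table(table, implicants, new_implicants):
--     new_table = []
--     for i in range(len(implicants)):
--         index = implicants.index(new_implicants[i])
--         new_table.append(table[index])
--     return new_table
--
-- def calc_table_minim_snf(what_snf, table, implicants):
--     all_implicants = [list(p) for p in permutations(implicants)]
--     all_minim_snf = {}
--     for i in range(len(all_implicants)):
--         new_implicants = all_implicants[i]
--         new_table = create_new_table(table, implicants, new_implicants)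
--         extra_implicants = calc_table_check_implic_snf(new_table, new_implicants)
--         minim_snf = ''
--         for implicant in new_implicants:
--             if implicant not in extra_implicants:
--                 minim_snf += implicant
--                 if what_snf == 'sknf':
--                     minim_snf += '&'
--                 else:
--                     minim_snf += '|'
--         minim_snf = minim_snf[:-1]
--         if what_snf == 'sknf':
--             impls = minim_snf.split('&')
--         if what_snf == 'sdnf':
--             impls = minim_snf.split('|')
--         all_minim_snf[minim_snf] = len(impls)
--     return find_minim_snf_from_all_snf(all_minim_snf)
-- ===== SOURCE B (Python) =====
-- from itertools import permutations
--
--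
-- def calc_table_minim_snf(what_snf, table, implicants):
--     # Precompute once: per-implicant 0/1 column masks (each implicant selects the row of its
--     # first occurrence, like list.index does) and total per-column coverage; walk each
--     # permutation maintaining decremented coverage counts and a set of removed implicants,
--     # keeping a running first strict minimum instead of a dict of all results.
--     sep = {'sknf': '&', 'sdnf': '|'}[what_snf]
--     n = len(implicants)
--     masks = [[1 if c == 'X' else 0 for c in table[implicants.index(imp)]] for imp in implicants]
--     width = len(masks[0]) if masks else 0
--     base = [sum(m[j] for m in masks) for j in range(width)]
--     best = None
--     best_len = None
--     for perm in permutations(range(n)):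
--         counts = base[:]
--         removed = set()
--         for i in perm:
--             m = masks[i]
--             if all(counts[j] - m[j] > 0 for j in range(width)):
--                 for j in range(width):
--                     counts[j] -= m[j]
--                 removed.add(implicants[i])
--         kept = [implicants[i] for i in perm if implicants[i] not in removed]
--         s = sep.join(kept)
--         length = s.count(sep) + 1
--         if best is None or length < best_len:
--             best, best_len = s, length
--     return best
-- ===== Notes on version B (the rewrite author's own statement) =====
-- stated objective: alternative
-- what changed: B precomputes each implicant's 0/1 column mask (row of its first occurrence) and the total per-column coverage once, walks every permutation maintaining decremented coverage counts and a set of removed implicants instead of rebuilding and re-scanning a popped table per step, and keeps a running first-strict-minimum (string, separator-count+1) instead of a dict of all results scanned afterwards.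
import Mathlib
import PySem

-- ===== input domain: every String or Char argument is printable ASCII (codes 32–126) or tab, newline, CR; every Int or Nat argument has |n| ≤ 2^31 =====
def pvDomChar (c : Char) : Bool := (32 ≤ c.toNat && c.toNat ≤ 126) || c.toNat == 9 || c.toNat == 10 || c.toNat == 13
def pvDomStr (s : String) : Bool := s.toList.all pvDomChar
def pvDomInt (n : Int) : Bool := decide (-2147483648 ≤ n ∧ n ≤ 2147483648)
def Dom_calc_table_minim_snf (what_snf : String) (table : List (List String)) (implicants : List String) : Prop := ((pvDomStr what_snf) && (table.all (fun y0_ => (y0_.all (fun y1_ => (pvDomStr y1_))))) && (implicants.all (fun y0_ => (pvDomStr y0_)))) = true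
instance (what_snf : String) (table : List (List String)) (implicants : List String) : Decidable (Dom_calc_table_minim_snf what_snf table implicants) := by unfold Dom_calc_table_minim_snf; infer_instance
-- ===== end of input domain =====

-- B precomputes per-implicant column masks and total per-column coverage once, maintains
-- decremented counts and a removed-set per permutation and a running first strict minimum,
-- instead of A's per-step table popping/recounting and final dict scan (same value).


-- ===== PORT A =====
-- Transliteration notes (both ports): 'for i in range(len(xs))' loops are folds over
-- List.range; indexing with these always-nonnegative in-range indices is List.getD/List.set
-- (exact there; Python raises IndexError out of range — such inputs are excluded by Pre_).
-- itertools.permutations is PySem.List.permutations (same enumeration order); built strings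
-- are kept as List Char (PySem.Chars) and packed with String.ofList at the very end.

def pvA_is_implicant_extra (all_const_X implic_X : List Int) : Bool :=
  let new_const_X := (List.range implic_X.length).foldl
      (fun a i => a.set i (a.getD i 0 - implic_X.getD i 0)) all_const_X
  new_const_X.all (fun number_of_X => decide (0 < number_of_X))

def pvA_calc_table_is_implicant_extra (table : List (List String)) (impl_index : Nat) : Bool :=
  let w := (table.getD 0 []).length   -- len(table[0]); table is nonempty at every call site
  let all_const_X := (List.range w).foldl
      (fun a i => (List.range table.length).foldl
        (fun a j => if (table.getD j []).getD i "" == "X" then a.set i (a.getD i 0 + 1) else a) a)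
      (List.replicate w (0 : Int))
  let row := table.getD impl_index []
  let implic_X := (List.range row.length).foldl
      (fun a i => if row.getD i "" == "X" then a.set i (a.getD i 0 + 1) else a)
      (List.replicate row.length (0 : Int))
  pvA_is_implicant_extra all_const_X implic_X

-- one iteration of the loop in calc_table_check_implic_snf: state (new_table, extra_implicants, index)
def pvA_check_step (st : List (List String) × List String × Nat) (imp : String) :
    List (List String) × List String × Nat :=
  if pvA_calc_table_is_implicant_extra st.1 st.2.2 then
    (st.1.eraseIdx st.2.2, st.2.1 ++ [imp], st.2.2)   -- new_table.pop(index) (index in range here)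
  else (st.1, st.2.1, st.2.2 + 1)

def pvA_calc_table_check_implic_snf (table : List (List String)) (implicants : List String) :
    List String :=
  (implicants.foldl pvA_check_step (table, ([] : List String), 0)).2.1

def pvA_find_minim_snf_from_all_snf (all_snf : PySem.Dict (List Char) Int) : String :=
  let keys := all_snf.keys
  -- all_snf[keys[0]]: the dict is nonempty at the call site (keys[0] raises otherwise)
  let r := keys.foldl
    (fun mm key => if all_snf.getD key 0 < mm.1 then (all_snf.getD key 0, key) else mm)
    (all_snf.getD (keys.getD 0 []) 0, keys.getD 0 [])
  String.ofList r.2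

def pvA_create_new_table (table : List (List String)) (implicants new_implicants : List String) :
    List (List String) :=
  (List.range implicants.length).foldl
    (fun new_table i =>
      -- implicants.index(new_implicants[i]); ValueError impossible: new_implicants permutes implicants
      let index := (PySem.List.index? implicants (new_implicants.getD i "")).getD 0
      new_table ++ [table.getD index []])
    []

def calc_table_minim_snf (what_snf : String) (table : List (List String)) (implicants : List String) : String :=
  let all_implicants := PySem.List.permutations implicants implicants.length
  let all_minim_snf := all_implicants.foldl
    (fun all_minim_snf new_implicants =>
      let new_table := pvA_create_new_table table implicants new_implicants
      let extra_implicants := pvA_calc_table_check_implic_snf new_table new_implicants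
      let minim_snf := new_implicants.foldl
        (fun s implicant =>
          if extra_implicants.contains implicant then s
          else s ++ implicant.toList ++ [if what_snf == "sknf" then '&' else '|'])
        ([] : List Char)
      let minim_snf := PySem.List.slice minim_snf none (some (-1))   -- minim_snf[:-1]
      -- when what_snf is neither 'sknf' nor 'sdnf' Python raises NameError (impls unbound);
      -- Pre_ excludes that, so the else branch below is exactly the 'sdnf' case
      let impls := if what_snf == "sknf" then PySem.Chars.splitOn minim_snf ['&']
                   else PySem.Chars.splitOn minim_snf ['|']
      all_minim_snf.insert minim_snf (impls.length : Int))
    (PySem.Dict.empty)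
  pvA_find_minim_snf_from_all_snf all_minim_snf

-- ===== PORT B =====
-- one iteration of B's inner loop: state (counts, removed)
def pvB_step (masks : List (List Int)) (implicants : List String) (width : Nat)
    (st : List Int × PySem.Set String) (i : Nat) : List Int × PySem.Set String :=
  let m := masks.getD i []
  if (List.range width).all (fun j => decide (0 < st.1.getD j 0 - m.getD j 0)) then
    ((List.range width).foldl (fun c j => c.set j (c.getD j 0 - m.getD j 0)) st.1,
      st.2.add (implicants.getD i ""))
  else st

def calc_table_minim_snf_alt (what_snf : String) (table : List (List String)) (implicants : List String) : String :=
  -- {'sknf': '&', 'sdnf': '|'}[what_snf]: KeyError for any other what_snf (excluded by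
  -- Pre_); on Pre_ this lookup is exactly the branch below
  let sep : Char := if what_snf == "sknf" then '&' else '|'
  let n := implicants.length
  -- implicants.index(imp); ValueError impossible: imp is drawn from implicants
  let masks := implicants.map (fun imp =>
      (table.getD ((PySem.List.index? implicants imp).getD 0) []).map
        (fun c => if c == "X" then (1 : Int) else 0))
  let width := (masks.headD []).length   -- len(masks[0]) if masks else 0
  let base := (List.range width).map (fun j => (masks.map (fun m => m.getD j 0)).sum)
  let best := (PySem.List.permutations (List.range n) n).foldl
    (fun best perm =>
      let st := perm.foldl (pvB_step masks implicants width) (base, (PySem.Set.empty : PySem.Set String))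
      let kept := (perm.filter (fun i => !(st.2.contains (implicants.getD i "")))).map
          (fun i => implicants.getD i "")
      let s := PySem.Chars.join [sep] (kept.map String.toList)
      let len : Int := (PySem.Chars.count s [sep] : Int) + 1
      match best with
      | none => some (s, len)
      | some b => if len < b.2 then some (s, len) else some b)
    (none : Option (List Char × Int))
  match best with
  | some b => String.ofList b.1
  | none => ""   -- unreachable: permutations always yields at least one permutation

-- ===== PRECONDITION & SPEC =====
-- Pre_ holds exactly where A returns normally; it excludes (i) what_snf other than
-- 'sknf'/'sdnf' (A raises NameError: impls unbound), and (ii) tables in which the row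
-- selected by some implicant (the row at its first occurrence index, as list.index picks
-- it) is missing (IndexError) or in which the selected rows do not all have the same
-- length (IndexError while counting the 'X' columns).
def Pre_calc_table_minim_snf (what_snf : String) (table : List (List String)) (implicants : List String) : Prop :=
  (what_snf = "sknf" ∨ what_snf = "sdnf") ∧
  (∀ i < implicants.length,
    (PySem.List.index? implicants (implicants.getD i "")).getD 0 < table.length) ∧
  (∀ i < implicants.length,
    (table.getD ((PySem.List.index? implicants (implicants.getD i "")).getD 0) []).length
      = (table.getD ((PySem.List.index? implicants (implicants.getD 0 "")).getD 0) []).length)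
instance (what_snf : String) (table : List (List String)) (implicants : List String) : Decidable (Pre_calc_table_minim_snf what_snf table implicants) := by unfold Pre_calc_table_minim_snf; infer_instance

def pvWitness_calc_table_minim_snf : String × List (List String) × List String :=
  ("sdnf", [["X", "0"], ["X", "X"]], ["a", "b"])

def Spec_calc_table_minim_snf (what_snf : String) (table : List (List String)) (implicants : List String) (out : String) : Prop := out = calc_table_minim_snf_alt what_snf table implicants
instance (what_snf : String) (table : List (List String)) (implicants : List String) (out : String) : Decidable (Spec_calc_table_minim_snf what_snf table implicants out) := by unfold Spec_calc_table_minim_snf; infer_instance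

-- ===== CLAIM (what is proved, stated in full; the proofs are below) =====
def Claim_equal_calc_table_minim_snf : Prop := ∀ (what_snf : String) (table : List (List String)) (implicants : List String), Dom_calc_table_minim_snf what_snf table implicants → Pre_calc_table_minim_snf what_snf table implicants → Spec_calc_table_minim_snf what_snf table implicants (calc_table_minim_snf what_snf table implicants)


-- ===== LEMMAS AND PROOFS =====

-- proof-level abbreviations ----------------------------------------------------------
def pvMask (c : String) : Int := if c == "X" then 1 else 0

def pvColC (T : List (List String)) (j : Nat) : Int := (T.map (fun r => pvMask (r.getD j ""))).sum

def pvCheck (W : Nat) (T : List (List String)) (row : List String) : Bool :=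
  (List.range W).all (fun j => decide (0 < pvColC T j - pvMask (row.getD j "")))

-- common specification of the greedy removal loop: returns (extra, kept)
-- common specification of the greedy removal loop: the list of removed implicants, in order
def pvGSpec (rows : Nat → List String) (g : Nat → String) (W : Nat) :
    List Nat → List (List String) → List String → List String
  | [], _, extra => extra
  | i :: r, K, extra =>
    if pvCheck W (K ++ (i :: r).map rows) (rows i) then
      pvGSpec rows g W r K (extra ++ [g i])
    else
      pvGSpec rows g W r (K ++ [rows i]) extra

-- the same loop accumulating the removed implicants as a Python set
def pvGSpecS (rows : Nat → List String) (g : Nat → String) (W : Nat) :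
    List Nat → List (List String) → PySem.Set String → PySem.Set String
  | [], _, s => s
  | i :: r, K, s =>
    if pvCheck W (K ++ (i :: r).map rows) (rows i) then
      pvGSpecS rows g W r K (s.add (g i))
    else
      pvGSpecS rows g W r (K ++ [rows i]) s

-- basic list toolbox -----------------------------------------------------------------
lemma pv_map_getD_range {α : Type} (xs : List α) (d : α) :
    (List.range xs.length).map (fun j => xs.getD j d) = xs := by
  apply List.ext_getElem
  · simp
  · intro i h1 h2
    simp [List.getD, List.getElem?_eq_getElem h2]

lemma pv_foldl_range_getD {α β : Type} (xs : List β) (d : β) (h : α → β → α) (a0 : α) :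
    (List.range xs.length).foldl (fun a j => h a (xs.getD j d)) a0 = xs.foldl h a0 := by
  conv_rhs => rw [← pv_map_getD_range xs d]
  rw [List.foldl_map]

lemma pv_getD_map {α β : Type} (xs : List α) (f : α → β) (i : Nat) (h : i < xs.length)
    (d : β) (e : α) : (xs.map f).getD i d = f (xs.getD i e) := by
  rw [List.getD_eq_getElem _ _ (by simpa using h), List.getD_eq_getElem _ _ h]
  simp

lemma pv_getD_append_mid {α : Type} (P : List α) (x : α) (l : List α) (d : α) (n : Nat)
    (h : P.length = n) : (P ++ x :: l).getD n d = x := by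
  subst h; simp [List.getD]

lemma pv_set_append_mid {α : Type} (P : List α) (x v : α) (l : List α) (n : Nat)
    (h : P.length = n) : (P ++ x :: l).set n v = P ++ v :: l := by
  subst h; simp

-- the single generic lemma behind every 'a[i] = f(i, a[i]) for i in range(m)' loop
lemma pv_foldl_set_generic (w : Nat) (g : Nat → Int → Int) (step : List Int → Nat → List Int)
    (hstep : ∀ a i, a.length = w → i < w → step a i = a.set i (g i (a.getD i 0))) :
    ∀ (m : Nat), m ≤ w → ∀ (a : List Int), a.length = w →
      (List.range m).foldl step a = (List.range m).map (fun i => g i (a.getD i 0)) ++ a.drop m := by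
  intro m
  induction m with
  | zero => intro _ a _; simp
  | succ m ih =>
    intro hm a ha
    rw [List.range_succ, List.foldl_append, List.foldl_cons, List.foldl_nil, ih (by omega) a ha]
    have hm' : m < a.length := by omega
    have hP : ((List.range m).map (fun i => g i (a.getD i 0))).length = m := by simp
    have hdrop : a.drop m = a.getD m 0 :: a.drop (m + 1) := by
      rw [List.getD_eq_getElem _ _ hm']
      exact List.drop_eq_getElem_cons hm'
    have hstep' := hstep ((List.range m).map (fun i => g i (a.getD i 0)) ++ a.drop m) m
      (by simp [ha]; omega) (by omega)
    rw [hstep', hdrop, pv_getD_append_mid _ _ _ _ _ hP, pv_set_append_mid _ _ _ _ _ hP]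
    simp

-- inner counting loop of calc_table_is_implicant_extra
lemma pv_colC_cons (r : List String) (T : List (List String)) (i : Nat) :
    pvColC (r :: T) i = pvMask (r.getD i "") + pvColC T i := by
  simp [pvColC]

lemma pv_inner_count (i : Nat) :
    ∀ (T : List (List String)) (a : List Int), i < a.length →
      T.foldl (fun a r => if r.getD i "" == "X" then a.set i (a.getD i 0 + 1) else a) a
        = a.set i (a.getD i 0 + pvColC T i) := by
  intro T
  induction T with
  | nil =>
    intro a ha
    rw [List.foldl_nil, pvColC, List.map_nil, List.sum_nil, add_zero,
      List.getD_eq_getElem _ _ ha, List.set_getElem_self ha]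
  | cons r T ih =>
    intro a ha
    rw [List.foldl_cons, pv_colC_cons]
    by_cases hx : (r.getD i "" == "X") = true
    · have hmask : pvMask (r.getD i "") = 1 := by unfold pvMask; rw [if_pos hx]
      rw [if_pos hx, ih _ (by simpa using ha), List.set_set]
      have hg : (a.set i (a.getD i 0 + 1)).getD i 0 = a.getD i 0 + 1 := by
        rw [List.getD_eq_getElem _ _ (by simpa using ha)]
        simp
      rw [hg, hmask]
      congr 1
      ring
    · have hmask : pvMask (r.getD i "") = 0 := by unfold pvMask; rw [if_neg hx]
      rw [if_neg hx, ih _ ha, hmask, zero_add]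

lemma pv_all_congr_mem {α : Type} (l : List α) (p q : α → Bool)
    (h : ∀ x ∈ l, p x = q x) : l.all p = l.all q := by
  induction l with
  | nil => rfl
  | cons x l ih =>
    simp only [List.all_cons, h x List.mem_cons_self,
      ih (fun y hy => h y (List.mem_cons_of_mem x hy))]

lemma pv_getD_replicate (W i : Nat) : (List.replicate W (0:Int)).getD i 0 = 0 := by
  rcases Nat.lt_or_ge i W with h | h
  · rw [List.getD_eq_getElem _ _ (by simpa using h)]; simp
  · rw [List.getD_eq_default _ _ (by simpa using h)]

-- rfl-unfoldings of the let-structured ports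
lemma pv_is_extra_unfold (allX implicX : List Int) :
    pvA_is_implicant_extra allX implicX
      = ((List.range implicX.length).foldl
          (fun a i => a.set i (a.getD i 0 - implicX.getD i 0)) allX).all
          (fun x => decide (0 < x)) := rfl

lemma pv_ctie_unfold (T : List (List String)) (idx : Nat) :
    pvA_calc_table_is_implicant_extra T idx
      = pvA_is_implicant_extra
          ((List.range (T.getD 0 []).length).foldl
            (fun a i => (List.range T.length).foldl
              (fun a j => if (T.getD j []).getD i "" == "X" then a.set i (a.getD i 0 + 1) else a) a)
            (List.replicate (T.getD 0 []).length (0:Int)))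
          ((List.range (T.getD idx []).length).foldl
            (fun a i => if (T.getD idx []).getD i "" == "X" then a.set i (a.getD i 0 + 1) else a)
            (List.replicate (T.getD idx []).length (0:Int))) := rfl

lemma pv_A_extra_eq (T : List (List String)) (idx W : Nat)
    (hlen : ∀ r ∈ T, r.length = W) (hidx : idx < T.length) :
    pvA_calc_table_is_implicant_extra T idx = pvCheck W T (T.getD idx []) := by
  have hw : (T.getD 0 []).length = W := by
    apply hlen
    rw [List.getD_eq_getElem _ _ (by omega : 0 < T.length)]
    exact List.getElem_mem _
  have hrowmem : T.getD idx [] ∈ T := by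
    rw [List.getD_eq_getElem _ _ hidx]; exact List.getElem_mem _
  have hrowlen : (T.getD idx []).length = W := hlen _ hrowmem
  rw [pv_ctie_unfold, hw, hrowlen]
  have hallX : (List.range W).foldl
      (fun a i => (List.range T.length).foldl
        (fun a j => if (T.getD j []).getD i "" == "X" then a.set i (a.getD i 0 + 1) else a) a)
      (List.replicate W (0:Int))
      = (List.range W).map (fun i => pvColC T i) := by
    rw [pv_foldl_set_generic W (fun i v => v + pvColC T i) _ ?hs W le_rfl _ (by simp)]
    case hs =>
      intro a i ha hi
      rw [pv_foldl_range_getD T ([] : List String)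
        (fun a r => if r.getD i "" == "X" then a.set i (a.getD i 0 + 1) else a) a]
      exact pv_inner_count i T a (by omega)
    rw [List.drop_replicate]
    simp only [Nat.sub_self, List.replicate_zero, List.append_nil]
    apply List.map_congr_left
    intro i _
    rw [pv_getD_replicate, zero_add]
  have himpl : (List.range W).foldl
      (fun a i => if (T.getD idx []).getD i "" == "X" then a.set i (a.getD i 0 + 1) else a)
      (List.replicate W (0:Int))
      = (List.range W).map (fun i => pvMask ((T.getD idx []).getD i "")) := by
    rw [pv_foldl_set_generic W (fun i v => v + pvMask ((T.getD idx []).getD i "")) _ ?hs2 W le_rfl _ (by simp)]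
    case hs2 =>
      intro a i ha hi
      show _ = a.set i (a.getD i 0 + pvMask ((T.getD idx []).getD i ""))
      by_cases hx : ((T.getD idx []).getD i "" == "X") = true
      · have hm1 : pvMask ((T.getD idx []).getD i "") = 1 := by unfold pvMask; rw [if_pos hx]
        rw [if_pos hx, hm1]
      · have hm0 : pvMask ((T.getD idx []).getD i "") = 0 := by unfold pvMask; rw [if_neg hx]
        rw [if_neg hx, hm0, add_zero, List.getD_eq_getElem _ _ (by omega),
          List.set_getElem_self (by omega)]
    rw [List.drop_replicate]
    simp only [Nat.sub_self, List.replicate_zero, List.append_nil]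
    apply List.map_congr_left
    intro i _
    rw [pv_getD_replicate, zero_add]
  rw [hallX, himpl, pv_is_extra_unfold]
  have hlenX : ((List.range W).map (fun i => pvMask ((T.getD idx []).getD i ""))).length = W := by simp
  have hlenA : ((List.range W).map (fun i => pvColC T i)).length = W := by simp
  rw [hlenX]
  rw [pv_foldl_set_generic W
      (fun i v => v - ((List.range W).map (fun i => pvMask ((T.getD idx []).getD i ""))).getD i 0)
      _ (fun a i _ _ => rfl) W le_rfl _ hlenA]
  rw [List.drop_eq_nil_of_le (by omega), List.append_nil, List.all_map]
  unfold pvCheck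
  apply pv_all_congr_mem
  intro i hi
  have hi' : i < W := List.mem_range.mp hi
  simp only [Function.comp]
  have e1 : (List.map (fun i => pvColC T i) (List.range W)).getD i 0 = pvColC T i :=
    PySem.List.getD_map_range _ _ _ _ hi'
  have e2 : (List.map (fun i => pvMask ((T.getD idx []).getD i "")) (List.range W)).getD i 0
      = pvMask ((T.getD idx []).getD i "") := PySem.List.getD_map_range _ _ _ _ hi'
  simp only [e1, e2]

lemma pv_eraseIdx_append_mid {α : Type} (P : List α) (x : α) (l : List α) (n : Nat)
    (h : P.length = n) : (P ++ x :: l).eraseIdx n = P ++ l := by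
  subst h
  rw [List.eraseIdx_append_of_length_le (le_refl _)]
  simp

lemma pv_colC_append (A B : List (List String)) (j : Nat) :
    pvColC (A ++ B) j = pvColC A j + pvColC B j := by
  simp [pvColC]

lemma pv_A_loop (rows : Nat → List String) (g : Nat → String) (W : Nat) :
    ∀ (r : List Nat) (K : List (List String)) (extra : List String),
      (∀ i ∈ r, (rows i).length = W) →
      (∀ row ∈ K, row.length = W) →
      ((r.map g).foldl pvA_check_step (K ++ r.map rows, extra, K.length)).2.1
        = pvGSpec rows g W r K extra := by
  intro r
  induction r with
  | nil => intro K extra _ _; simp [pvGSpec]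
  | cons i r ih =>
    intro K extra hr hK
    simp only [List.map_cons, List.foldl_cons, pvGSpec]
    have hTrow : (K ++ rows i :: r.map rows).getD K.length [] = rows i :=
      pv_getD_append_mid _ _ _ _ _ rfl
    have hcheck : pvA_calc_table_is_implicant_extra (K ++ rows i :: r.map rows) K.length
        = pvCheck W (K ++ rows i :: r.map rows) (rows i) := by
      have hrows : ∀ row ∈ K ++ rows i :: r.map rows, row.length = W := by
        intro row hrow
        rcases List.mem_append.mp hrow with h | h
        · exact hK _ h
        · rcases List.mem_cons.mp h with h' | h'
          · rw [h']; exact hr i List.mem_cons_self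
          · rcases List.mem_map.mp h' with ⟨k, hk, rfl⟩
            exact hr k (List.mem_cons_of_mem _ hk)
      have := pv_A_extra_eq (K ++ rows i :: r.map rows) K.length W hrows (by simp)
      rwa [hTrow] at this
    unfold pvA_check_step
    simp only []
    rw [hcheck]
    by_cases hc : pvCheck W (K ++ rows i :: r.map rows) (rows i) = true
    · rw [if_pos hc, if_pos hc]
      have herase : (K ++ rows i :: r.map rows).eraseIdx K.length = K ++ r.map rows :=
        pv_eraseIdx_append_mid _ _ _ _ rfl
      rw [herase]
      exact ih K (extra ++ [g i]) (fun k hk => hr k (List.mem_cons_of_mem _ hk)) hK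
    · rw [if_neg hc, if_neg hc]
      have hshape : K ++ rows i :: r.map rows = (K ++ [rows i]) ++ r.map rows := by simp
      have hlen' : K.length + 1 = (K ++ [rows i]).length := by simp
      rw [hshape, hlen']
      apply ih (K ++ [rows i]) extra (fun k hk => hr k (List.mem_cons_of_mem _ hk))
      intro row hrow
      rcases List.mem_append.mp hrow with h | h
      · exact hK _ h
      · rw [List.mem_singleton.mp h]
        exact hr i List.mem_cons_self

lemma pv_B_loop (rows : Nat → List String) (implicants : List String) (W : Nat)
    (masks : List (List Int))
    (hmask : ∀ i < implicants.length, masks.getD i [] = (rows i).map pvMask) :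
    ∀ (r : List Nat) (K : List (List String)) (S : PySem.Set String) (counts : List Int),
      (∀ i ∈ r, i < implicants.length) →
      (∀ i ∈ r, (rows i).length = W) →
      counts.length = W →
      (∀ j, j < W → counts.getD j 0 = pvColC (K ++ r.map rows) j) →
      (r.foldl (pvB_step masks implicants W) (counts, S)).2
        = pvGSpecS rows (fun i => implicants.getD i "") W r K S := by
  intro r
  induction r with
  | nil => intro K S counts _ _ _ _; simp [pvGSpecS]
  | cons i r ih =>
    intro K S counts hn hr hlen hinv
    simp only [List.foldl_cons, pvGSpecS, List.map_cons]
    have hm : masks.getD i [] = (rows i).map pvMask := hmask i (hn i List.mem_cons_self)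
    have hrowlen : (rows i).length = W := hr i List.mem_cons_self
    unfold pvB_step
    simp only []
    rw [hm]
    have hinv' : ∀ j, j < W → counts.getD j 0 = pvColC (K ++ rows i :: r.map rows) j := by
      intro j hj
      have := hinv j hj
      rwa [List.map_cons] at this
    have hcond : ((List.range W).all (fun j =>
        decide (0 < counts.getD j 0 - ((rows i).map pvMask).getD j 0)))
        = pvCheck W (K ++ rows i :: r.map rows) (rows i) := by
      unfold pvCheck
      apply pv_all_congr_mem
      intro j hj
      have hj' : j < W := List.mem_range.mp hj
      have e1 := hinv' j hj'
      have e2 : ((rows i).map pvMask).getD j 0 = pvMask ((rows i).getD j "") :=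
        pv_getD_map _ _ _ (by omega) _ _
      simp only [e1, e2]
    rw [hcond]
    by_cases hc : pvCheck W (K ++ rows i :: r.map rows) (rows i) = true
    · rw [if_pos hc, if_pos hc]
      rw [pv_foldl_set_generic W
          (fun j v => v - ((rows i).map pvMask).getD j 0) _ (fun a j _ _ => rfl)
          W le_rfl _ hlen]
      rw [List.drop_eq_nil_of_le (by omega), List.append_nil]
      apply ih K (S.add (implicants.getD i "")) _
        (fun k hk => hn k (List.mem_cons_of_mem _ hk))
        (fun k hk => hr k (List.mem_cons_of_mem _ hk))
        (by simp)
      intro j hj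
      rw [PySem.List.getD_map_range _ _ _ _ hj]
      have e2 : ((rows i).map pvMask).getD j 0 = pvMask ((rows i).getD j "") :=
        pv_getD_map _ _ _ (by omega) _ _
      rw [e2, hinv' j hj, pv_colC_append, pv_colC_cons, pv_colC_append]
      ring
    · rw [if_neg hc, if_neg hc]
      apply ih (K ++ [rows i]) S counts
        (fun k hk => hn k (List.mem_cons_of_mem _ hk))
        (fun k hk => hr k (List.mem_cons_of_mem _ hk)) hlen
      intro j hj
      rw [hinv' j hj]
      congr 1
      simp

lemma pv_gspecS_ofList (rows : Nat → List String) (g : Nat → String) (W : Nat) :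
    ∀ (r : List Nat) (K : List (List String)) (extra : List String),
      pvGSpecS rows g W r K (PySem.Set.ofList extra)
        = PySem.Set.ofList (pvGSpec rows g W r K extra) := by
  intro r
  induction r with
  | nil => intro K extra; simp [pvGSpecS, pvGSpec]
  | cons i r ih =>
    intro K extra
    rw [pvGSpecS, pvGSpec]
    split
    · have hadd : (PySem.Set.ofList extra).add (g i) = PySem.Set.ofList (extra ++ [g i]) := by
        rw [PySem.Set.ofList, PySem.Set.ofList, List.foldl_append, List.foldl_cons,
          List.foldl_nil]
      rw [hadd, ih]
    · exact ih _ _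

lemma pv_set_contains_true {α : Type} [BEq α] [LawfulBEq α] (l : List α) (x : α) (h : x ∈ l) :
    (PySem.Set.ofList l).contains x = true := by
  unfold PySem.Set.contains
  exact List.contains_iff_mem.mpr ((PySem.Set.mem_ofList l x).mpr h)

lemma pv_set_contains_false {α : Type} [BEq α] [LawfulBEq α] (l : List α) (x : α) (h : x ∉ l) :
    (PySem.Set.ofList l).contains x = false := by
  rw [← Bool.not_eq_true]
  intro hc
  exact h ((PySem.Set.mem_ofList l x).mp (List.contains_iff_mem.mp hc))

lemma pv_contains_ofList {α : Type} [BEq α] [LawfulBEq α] (l : List α) (x : α) :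
    (PySem.Set.ofList l).contains x = l.contains x := by
  by_cases hm : x ∈ l
  · rw [pv_set_contains_true l x hm, List.contains_iff_mem.mpr hm]
  · rw [pv_set_contains_false l x hm]
    rw [eq_comm, ← Bool.not_eq_true, List.contains_iff_mem]
    exact hm

lemma pv_build_eq (extra : List String) (sep : Char) :
    ∀ (p : List String) (acc : List Char),
      p.foldl (fun s imp => if extra.contains imp then s else s ++ imp.toList ++ [sep]) acc
        = acc ++ (p.filter (fun imp => !extra.contains imp)).flatMap
            (fun imp => imp.toList ++ [sep]) := by
  intro p
  induction p with
  | nil => intro acc; simp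
  | cons imp p ih =>
    intro acc
    rw [List.foldl_cons, List.filter_cons]
    by_cases hc : extra.contains imp = true
    · rw [if_pos hc]
      simp only [hc, Bool.not_true]
      rw [ih]
      rfl
    · rw [if_neg hc]
      simp only [Bool.not_eq_true] at hc
      simp only [hc, Bool.not_false, if_true]
      rw [ih]
      simp

lemma pv_join_eq (sep : Char) :
    ∀ (kept : List String),
      PySem.Chars.join [sep] (kept.map String.toList)
        = (kept.flatMap (fun imp => imp.toList ++ [sep])).dropLast := by
  intro kept
  induction kept with
  | nil => simp [PySem.Chars.join_nil]
  | cons a t ih =>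
    cases t with
    | nil => simp [PySem.Chars.join_singleton]
    | cons b t' =>
      simp only [List.map_cons]
      rw [PySem.Chars.join_cons_cons]
      rw [List.flatMap_cons]
      rw [List.dropLast_append_of_ne_nil (by simp)]
      rw [← ih]
      simp [List.append_assoc]

lemma pv_splitOn_go_len (c : Char) :
    ∀ (fuel : Nat) (l cur : List Char) (acc : List (List Char)), l.length ≤ fuel →
      (PySem.Chars.splitOn.go [c] fuel l cur acc).length = acc.length + 1 + l.count c := by
  intro fuel
  induction fuel with
  | zero =>
    intro l cur acc hl
    have : l = [] := List.length_eq_zero_iff.mp (by omega)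
    subst this
    rw [PySem.Chars.splitOn.go]
    simp
  | succ fuel ih =>
    intro l cur acc hl
    cases l with
    | nil =>
      rw [PySem.Chars.splitOn.go]
      simp
      omega
    | cons c' rest =>
      rw [PySem.Chars.splitOn.go]
      simp only [List.isPrefixOf_cons₂]
      by_cases hc : (c == c') = true
      · simp only [hc, List.isPrefixOf_nil_left, Bool.and_true]
        rw [if_pos trivial]
        have hrec := ih rest [] (cur.reverse :: acc) (by simpa using hl)
        simp only [List.length_cons] at hrec ⊢
        rw [show List.drop (List.length ([] : List Char) + 1) (c' :: rest) = rest from by simp]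
        rw [hrec, List.count_cons]
        have hcc : (c' == c) = true := by
          have h : c = c' := by simpa using hc
          simp [h]
        simp [hcc]
        omega
      · simp only [hc]
        rw [if_neg (by simp)]
        rw [ih rest (c' :: cur) acc (by simpa using hl), List.count_cons]
        have hcc : (c' == c) = false := by
          simp only [beq_eq_false_iff_ne]
          intro h2
          exact (by simpa using hc : ¬ c = c') h2.symm
        simp [hcc]

lemma pv_count_go (c : Char) :
    ∀ (fuel : Nat) (l : List Char) (acc : Nat), l.length ≤ fuel →
      PySem.Chars.count.go [c] fuel l acc = acc + l.count c := by
  intro fuel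
  induction fuel with
  | zero =>
    intro l acc hl
    have : l = [] := List.length_eq_zero_iff.mp (by omega)
    subst this
    rw [PySem.Chars.count.go]
    simp
  | succ fuel ih =>
    intro l acc hl
    cases l with
    | nil =>
      rw [PySem.Chars.count.go]
      simp
      omega
    | cons c' rest =>
      rw [PySem.Chars.count.go]
      simp only [List.isPrefixOf_cons₂]
      by_cases hc : (c == c') = true
      · simp only [hc, List.isPrefixOf_nil_left, Bool.and_true]
        rw [if_pos trivial]
        have hrec := ih rest (acc + 1) (by simpa using hl)
        simp only [List.length_cons] at hrec ⊢
        rw [show List.drop (List.length ([] : List Char) + 1) (c' :: rest) = rest from by simp]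
        rw [hrec, List.count_cons]
        have hcc : (c' == c) = true := by
          have h : c = c' := by simpa using hc
          simp [h]
        simp [hcc]
        omega
      · simp only [hc]
        rw [if_neg (by simp)]
        rw [ih rest acc (by simpa using hl), List.count_cons]
        have hcc : (c' == c) = false := by
          simp only [beq_eq_false_iff_ne]
          intro h2
          exact (by simpa using hc : ¬ c = c') h2.symm
        simp [hcc]

lemma pv_split_count (c : Char) (s : List Char) :
    (PySem.Chars.splitOn s [c]).length = PySem.Chars.count s [c] + 1 := by
  rw [PySem.Chars.splitOn, PySem.Chars.count]
  rw [if_neg (by simp)]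
  rw [pv_splitOn_go_len c (s.length + 1) s [] [] (by omega)]
  rw [pv_count_go c s.length s 0 le_rfl]
  simp
  omega

-- itertools.permutations: unfolding equations and facts
lemma pv_perms_succ {α : Type} (xs : List α) (r : Nat) :
    PySem.List.permutations xs (r+1)
      = (List.range xs.length).flatMap (fun i =>
          match xs[i]? with
          | none => []
          | some x => (PySem.List.permutations (xs.eraseIdx i) r).map (x :: ·)) := by
  rw [PySem.List.permutations]
  congr 1

lemma pv_perms_map {α β : Type} (f : α → β) :
    ∀ (r : Nat) (xs : List α),
      PySem.List.permutations (xs.map f) r = (PySem.List.permutations xs r).map (List.map f) := by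
  intro r
  induction r with
  | zero => intro xs; rfl
  | succ r ih =>
    intro xs
    rw [pv_perms_succ, pv_perms_succ, List.length_map, List.map_flatMap]
    congr 1
    funext i
    cases h : xs[i]? with
    | none =>
      have hm : (xs.map f)[i]? = none := by
        rw [List.getElem?_map, h]; rfl
      simp [hm]
    | some x =>
      have hm : (xs.map f)[i]? = some (f x) := by
        rw [List.getElem?_map, h]; rfl
      simp only [hm]
      rw [List.eraseIdx_map, ih]
      rw [List.map_map, List.map_map]
      rfl

lemma pv_perms_ne_nil {α : Type} :
    ∀ (xs : List α), PySem.List.permutations xs xs.length ≠ [] := by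
  intro xs
  induction xs with
  | nil => intro h; simp at h
  | cons x xs ih =>
    rw [List.length_cons, pv_perms_succ]
    intro h
    rw [List.flatMap_eq_nil_iff] at h
    have h0 := h 0 (by simp)
    simp only [List.getElem?_cons_zero, List.eraseIdx_cons_zero] at h0
    rw [List.map_eq_nil_iff] at h0
    exact ih h0

-- dict built by inserting a value that is a function of the key
lemma pv_dict_getD (F : List Char → Int) (kf : List Nat → List Char) :
    ∀ (P : List (List Nat)) (d : PySem.Dict (List Char) Int) (k : List Char) (d0 : Int),
      (P.foldl (fun d x => d.insert (kf x) (F (kf x))) d).getD k d0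
        = if k ∈ P.map kf then F k else d.getD k d0 := by
  intro P
  induction P using List.reverseRecOn with
  | nil => intro d k d0; simp
  | append_singleton P x ih =>
    intro d k d0
    rw [List.foldl_append, List.foldl_cons, List.foldl_nil, PySem.Dict.getD_insert, ih]
    by_cases hk : k = kf x
    · subst hk
      simp
    · rw [if_neg hk]
      by_cases hm : k ∈ P.map kf
      · rw [if_pos hm, if_pos (by simp [hm])]
      · rw [if_neg hm, if_neg (by simp [hm, hk])]

-- the first-strict-minimum fold
def pvFm (F : List Char → Int) (b : Int × List Char) (l : List (List Char)) : Int × List Char :=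
  l.foldl (fun mm key => if F key < mm.1 then (F key, key) else mm) b

lemma pv_fm_le (F : List Char → Int) :
    ∀ (l : List (List Char)) (b : Int × List Char),
      (pvFm F b l).1 ≤ b.1 ∧ ∀ x ∈ l, (pvFm F b l).1 ≤ F x := by
  intro l
  induction l with
  | nil => intro b; exact ⟨le_rfl, by simp⟩
  | cons x l ih =>
    intro b
    rw [pvFm, List.foldl_cons]
    by_cases hc : F x < b.1
    · rw [if_pos hc]
      refine ⟨le_trans (ih (F x, x)).1 (le_of_lt hc), ?_⟩
      intro y hy
      rcases List.mem_cons.mp hy with rfl | hy'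
      · exact (ih (F y, y)).1
      · exact (ih (F x, x)).2 y hy'
    · rw [if_neg hc]
      refine ⟨(ih b).1, ?_⟩
      intro y hy
      rcases List.mem_cons.mp hy with rfl | hy'
      · exact le_trans (ih b).1 (not_lt.mp hc)
      · exact (ih b).2 y hy'

lemma pv_fm_ofList (F : List Char → Int) :
    ∀ (l : List (List Char)) (b : Int × List Char),
      pvFm F b l = pvFm F b (PySem.Set.ofList l) := by
  intro l
  induction l using List.reverseRecOn with
  | nil => intro b; rfl
  | append_singleton l x ih =>
    intro b
    have hof : PySem.Set.ofList (l ++ [x]) = PySem.Set.add (PySem.Set.ofList l) x := by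
      rw [PySem.Set.ofList, PySem.Set.ofList, List.foldl_append, List.foldl_cons, List.foldl_nil]
    by_cases hm : x ∈ l
    · have hadd : PySem.Set.ofList (l ++ [x]) = PySem.Set.ofList l := by
        rw [hof]; unfold PySem.Set.add
        rw [if_pos (pv_set_contains_true l x hm)]
      rw [hadd, ← ih b]
      have hle := (pv_fm_le F l b).2 x hm
      rw [pvFm] at hle
      simp only [pvFm, List.foldl_append, List.foldl_cons, List.foldl_nil]
      rw [if_neg (not_lt.mpr hle)]
    · have hadd : PySem.Set.ofList (l ++ [x]) = PySem.Set.ofList l ++ [x] := by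
        rw [hof]; unfold PySem.Set.add
        rw [if_neg (by rw [pv_set_contains_false l x hm]; simp)]
      rw [hadd]
      simp only [pvFm, List.foldl_append, List.foldl_cons, List.foldl_nil]
      have hih := ih b
      simp only [pvFm] at hih
      rw [hih]

lemma pv_map_getD_range_comp {α β : Type} (xs : List α) (d : α) (F : α → β) :
    (List.range xs.length).map (fun i => F (xs.getD i d)) = xs.map F := by
  conv_rhs => rw [← pv_map_getD_range xs d]
  rw [List.map_map]
  rfl

lemma pv_add_prefix {α : Type} [BEq α] :
    ∀ (t : List α) (s : PySem.Set α), s <+: t.foldl PySem.Set.add s := by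
  intro t
  induction t with
  | nil => intro s; exact List.prefix_refl s
  | cons x t ih =>
    intro s
    rw [List.foldl_cons]
    refine List.IsPrefix.trans ?_ (ih (PySem.Set.add s x))
    unfold PySem.Set.add
    by_cases hc : s.contains x = true
    · rw [if_pos hc]
    · rw [if_neg hc]; exact ⟨[x], rfl⟩

lemma pv_ofList_head {α : Type} [BEq α] (h : α) (t : List α) (d : α) :
    (PySem.Set.ofList (h :: t)).getD 0 d = h := by
  rw [PySem.Set.ofList, List.foldl_cons]
  have : PySem.Set.add PySem.Set.empty h = [h] := by
    unfold PySem.Set.add PySem.Set.empty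
    simp [PySem.Set.contains]
  rw [this]
  obtain ⟨rest, hr⟩ := pv_add_prefix t [h]
  rw [← hr]
  rfl

-- per-permutation keys and values
def pvKEY (table : List (List String)) (implicants : List String) (W : Nat) (sep : Char)
    (q : List Nat) : List Char :=
  PySem.Chars.join [sep]
    (((q.map (fun i => implicants.getD i "")).filter (fun imp =>
        !((pvGSpec (fun i => table.getD ((PySem.List.index? implicants
              (implicants.getD i "")).getD 0) [])
            (fun i => implicants.getD i "") W q [] []).contains imp))).map String.toList)

def pvF (sep : Char) (s : List Char) : Int := ((PySem.Chars.splitOn s [sep]).length : Int)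

lemma pv_q_facts (n : Nat) (q : List Nat) (hq : q.Perm (List.range n)) :
    q.length = n ∧ ∀ i ∈ q, i < n := by
  refine ⟨by rw [hq.length_eq, List.length_range],
    fun i hi => List.mem_range.mp (hq.mem_iff.mp hi)⟩

lemma pv_cnt_unfold (table : List (List String)) (implicants p : List String) :
    pvA_create_new_table table implicants p
      = (List.range implicants.length).foldl
          (fun new_table i =>
            new_table ++ [table.getD ((PySem.List.index? implicants (p.getD i "")).getD 0) []])
          [] := rfl

lemma pv_cnt_eq (table : List (List String)) (implicants : List String)
    (q : List Nat) (hqlen : q.length = implicants.length) :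
    pvA_create_new_table table implicants (q.map (fun i => implicants.getD i ""))
      = q.map (fun i => table.getD ((PySem.List.index? implicants
          (implicants.getD i "")).getD 0) []) := by
  rw [pv_cnt_unfold, PySem.List.foldl_append_singleton_eq_map, List.nil_append]
  have hstep : ∀ i ∈ List.range implicants.length,
      table.getD ((PySem.List.index? implicants
          ((q.map (fun k => implicants.getD k "")).getD i "")).getD 0) []
        = table.getD ((PySem.List.index? implicants
            (implicants.getD (q.getD i 0) "")).getD 0) [] := by
    intro i hi
    have hiq : i < q.length := by
      have := List.mem_range.mp hi
      omega
    rw [pv_getD_map q _ i hiq "" 0]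
  rw [List.map_congr_left hstep, ← hqlen, pv_map_getD_range_comp q 0
    (fun k => table.getD ((PySem.List.index? implicants (implicants.getD k "")).getD 0) [])]

lemma pv_A_perm_key (table : List (List String)) (implicants : List String) (W : Nat) (sep : Char)
    (hunif : ∀ i < implicants.length,
      (table.getD ((PySem.List.index? implicants (implicants.getD i "")).getD 0) []).length = W)
    (q : List Nat) (hq : q.Perm (List.range implicants.length)) :
    PySem.List.slice
      ((q.map (fun i => implicants.getD i "")).foldl
        (fun s implicant =>
          if (pvA_calc_table_check_implic_snf
                (pvA_create_new_table table implicants (q.map (fun i => implicants.getD i "")))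
                (q.map (fun i => implicants.getD i ""))).contains implicant then s
          else s ++ implicant.toList ++ [sep]) [])
      none (some (-1))
    = pvKEY table implicants W sep q := by
  obtain ⟨hqlen, hqmem⟩ := pv_q_facts _ q hq
  rw [pv_cnt_eq table implicants q hqlen]
  have hextra : pvA_calc_table_check_implic_snf
      (q.map (fun i => table.getD ((PySem.List.index? implicants
          (implicants.getD i "")).getD 0) []))
      (q.map (fun i => implicants.getD i ""))
      = pvGSpec (fun i => table.getD ((PySem.List.index? implicants
          (implicants.getD i "")).getD 0) []) (fun i => implicants.getD i "") W q [] [] := by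
    unfold pvA_calc_table_check_implic_snf
    have := pv_A_loop (fun i => table.getD ((PySem.List.index? implicants
        (implicants.getD i "")).getD 0) []) (fun i => implicants.getD i "") W q [] []
      (fun i hi => hunif i (hqmem i hi)) (by simp)
    simpa using this
  rw [hextra, pv_build_eq, List.nil_append, PySem.List.slice_to_neg_one, pvKEY, pv_join_eq]

lemma pv_B_perm_key (table : List (List String)) (implicants : List String) (W : Nat) (sep : Char)
    (hunif : ∀ i < implicants.length,
      (table.getD ((PySem.List.index? implicants (implicants.getD i "")).getD 0) []).length = W)
    (q : List Nat) (hq : q.Perm (List.range implicants.length)) :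
    PySem.Chars.join [sep]
      (((q.filter (fun i => !((q.foldl (pvB_step (implicants.map (fun imp =>
            (table.getD ((PySem.List.index? implicants imp).getD 0) []).map
              (fun c => if c == "X" then (1 : Int) else 0))) implicants W)
          ((List.range W).map (fun j => ((implicants.map (fun imp =>
              (table.getD ((PySem.List.index? implicants imp).getD 0) []).map
                (fun c => if c == "X" then (1 : Int) else 0))).map (fun m => m.getD j 0)).sum),
            (PySem.Set.empty : PySem.Set String))).2.contains (implicants.getD i "")))).map
        (fun i => implicants.getD i "")).map String.toList)
    = pvKEY table implicants W sep q := by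
  obtain ⟨hqlen, hqmem⟩ := pv_q_facts _ q hq
  have hmask : ∀ i < implicants.length,
      (implicants.map (fun imp =>
        (table.getD ((PySem.List.index? implicants imp).getD 0) []).map
          (fun c => if c == "X" then (1 : Int) else 0))).getD i []
      = (table.getD ((PySem.List.index? implicants (implicants.getD i "")).getD 0) []).map
          pvMask := by
    intro i hi
    rw [pv_getD_map implicants _ i hi [] ""]
    rfl
  have hinv : ∀ j, j < W →
      ((List.range W).map (fun j => ((implicants.map (fun imp =>
          (table.getD ((PySem.List.index? implicants imp).getD 0) []).map
            (fun c => if c == "X" then (1 : Int) else 0))).map (fun m => m.getD j 0)).sum)).getD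
        j 0
      = pvColC ([] ++ q.map (fun i => table.getD ((PySem.List.index? implicants
          (implicants.getD i "")).getD 0) [])) j := by
    intro j hj
    rw [PySem.List.getD_map_range _ _ _ _ hj, List.nil_append]
    rw [show implicants.map (fun imp =>
          (table.getD ((PySem.List.index? implicants imp).getD 0) []).map
            (fun c => if c == "X" then (1 : Int) else 0))
        = (List.range implicants.length).map (fun i =>
            (table.getD ((PySem.List.index? implicants (implicants.getD i "")).getD 0) []).map
              (fun c => if c == "X" then (1 : Int) else 0))
      from (pv_map_getD_range_comp implicants "" _).symm]
    rw [List.map_map]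
    rw [List.map_congr_left (f := (fun m => m.getD j 0) ∘ (fun i =>
        (table.getD ((PySem.List.index? implicants (implicants.getD i "")).getD 0) []).map
          (fun c => if c == "X" then (1 : Int) else 0)))
      (g := fun i => pvMask ((table.getD ((PySem.List.index? implicants
        (implicants.getD i "")).getD 0) []).getD j ""))
      (by
        intro i hi
        have hi' := List.mem_range.mp hi
        have hjr : j < (table.getD ((PySem.List.index? implicants
            (implicants.getD i "")).getD 0) []).length := by
          rw [hunif i hi']; omega
        exact pv_getD_map _ _ _ hjr _ "")]
    unfold pvColC
    rw [List.map_map]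
    exact (List.Perm.sum_eq (List.Perm.map _ hq)).symm
  have hb := pv_B_loop (fun i => table.getD ((PySem.List.index? implicants
      (implicants.getD i "")).getD 0) []) implicants W _ hmask q [] PySem.Set.empty _
    hqmem (fun i hi => hunif i (hqmem i hi)) (by simp) hinv
  rw [hb, show (PySem.Set.empty : PySem.Set String) = PySem.Set.ofList [] from rfl,
    pv_gspecS_ofList]
  have hfil : (q.filter (fun i => !((PySem.Set.ofList (pvGSpec (fun i => table.getD
        ((PySem.List.index? implicants (implicants.getD i "")).getD 0) [])
        (fun i => implicants.getD i "") W q [] [])).contains (implicants.getD i ""))))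
      = q.filter (fun i => !((pvGSpec (fun i => table.getD
        ((PySem.List.index? implicants (implicants.getD i "")).getD 0) [])
        (fun i => implicants.getD i "") W q [] []).contains (implicants.getD i ""))) := by
    apply List.filter_congr
    intro i _
    rw [pv_contains_ofList]
  rw [hfil, pvKEY]
  congr 1
  rw [List.filter_map]
  rfl

lemma pv_find_minim_unfold (d : PySem.Dict (List Char) Int) :
    pvA_find_minim_snf_from_all_snf d
      = String.ofList ((d.keys.foldl
          (fun mm key => if d.getD key 0 < mm.1 then (d.getD key 0, key) else mm)
          (d.getD (d.keys.getD 0 []) 0, d.keys.getD 0 [])).2) := rfl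

lemma pv_opt_fold (KEY : List Nat → List Char) (F : List Char → Int) :
    ∀ (P : List (List Nat)) (k : List Char),
      P.foldl (fun best q =>
          match best with
          | none => some (KEY q, F (KEY q))
          | some b => if F (KEY q) < b.2 then some (KEY q, F (KEY q)) else some b)
        (some (k, F k))
      = some ((pvFm F (F k, k) (P.map KEY)).2, (pvFm F (F k, k) (P.map KEY)).1) := by
  intro P
  induction P with
  | nil => intro k; simp [pvFm]
  | cons q P ih =>
    intro k
    rw [List.foldl_cons, List.map_cons]
    show P.foldl _ (if F (KEY q) < F k then some (KEY q, F (KEY q)) else some (k, F k)) = _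
    rw [pvFm, List.foldl_cons]
    by_cases hc : F (KEY q) < F k
    · rw [if_pos hc, ih (KEY q), if_pos hc]
      rfl
    · rw [if_neg hc, ih k, if_neg hc]
      rfl

-- named per-permutation bodies of the two outer folds (definitionally those of the ports)
def pvSliceKey (table : List (List String)) (implicants : List String) (sep : Char)
    (new_implicants : List String) : List Char :=
  PySem.List.slice
    (new_implicants.foldl (fun s implicant =>
        if (pvA_calc_table_check_implic_snf
              (pvA_create_new_table table implicants new_implicants)
              new_implicants).contains implicant then s
        else s ++ implicant.toList ++ [sep]) ([] : List Char))
    none (some (-1))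

def pvBodyA (table : List (List String)) (implicants : List String) (sep : Char)
    (d : PySem.Dict (List Char) Int) (new_implicants : List String) :
    PySem.Dict (List Char) Int :=
  d.insert (pvSliceKey table implicants sep new_implicants)
    ((PySem.Chars.splitOn (pvSliceKey table implicants sep new_implicants) [sep]).length : Int)

def pvMasksB (table : List (List String)) (implicants : List String) : List (List Int) :=
  implicants.map (fun imp =>
    (table.getD ((PySem.List.index? implicants imp).getD 0) []).map
      (fun c => if c == "X" then (1 : Int) else 0))

def pvWidthB (table : List (List String)) (implicants : List String) : Nat :=
  ((pvMasksB table implicants).headD []).length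

def pvBaseB (table : List (List String)) (implicants : List String) : List Int :=
  (List.range (pvWidthB table implicants)).map
    (fun j => ((pvMasksB table implicants).map (fun m => m.getD j 0)).sum)

def pvBKey (table : List (List String)) (implicants : List String) (sep : Char)
    (perm : List Nat) : List Char :=
  PySem.Chars.join [sep]
    (((perm.filter (fun i => !((perm.foldl
          (pvB_step (pvMasksB table implicants) implicants (pvWidthB table implicants))
          (pvBaseB table implicants, (PySem.Set.empty : PySem.Set String))).2.contains
          (implicants.getD i "")))).map (fun i => implicants.getD i "")).map String.toList)

def pvBodyB (table : List (List String)) (implicants : List String) (sep : Char)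
    (best : Option (List Char × Int)) (perm : List Nat) : Option (List Char × Int) :=
  match best with
  | none => some (pvBKey table implicants sep perm,
      (PySem.Chars.count (pvBKey table implicants sep perm) [sep] : Int) + 1)
  | some b =>
    if ((PySem.Chars.count (pvBKey table implicants sep perm) [sep] : Int) + 1) < b.2 then
      some (pvBKey table implicants sep perm,
        (PySem.Chars.count (pvBKey table implicants sep perm) [sep] : Int) + 1)
    else some b

-- the whole computation, after what_snf is resolved, parametric in the separator
lemma pv_main_core (table : List (List String)) (implicants : List String) (sep : Char)
    (hunif0 : ∀ i < implicants.length,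
      (table.getD ((PySem.List.index? implicants (implicants.getD i "")).getD 0) []).length
        = (table.getD ((PySem.List.index? implicants (implicants.getD 0 "")).getD 0) []).length) :
    pvA_find_minim_snf_from_all_snf
      ((PySem.List.permutations implicants implicants.length).foldl
        (pvBodyA table implicants sep) PySem.Dict.empty)
    = (match (PySem.List.permutations (List.range implicants.length)
          implicants.length).foldl (pvBodyB table implicants sep) none with
      | some b => String.ofList b.1
      | none => "") := by
  have hunif : ∀ i < implicants.length,
      (table.getD ((PySem.List.index? implicants (implicants.getD i "")).getD 0) []).length
        = pvWidthB table implicants := by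
    intro i hi
    have hn1 : 0 < implicants.length := by omega
    have hW0 : pvWidthB table implicants
        = (table.getD ((PySem.List.index? implicants (implicants.getD 0 "")).getD 0) []).length := by
      cases hcase : implicants with
      | nil =>
        exfalso
        rw [hcase] at hn1
        simp at hn1
      | cons a t =>
        subst hcase
        simp [pvWidthB, pvMasksB]
    rw [hW0]
    exact hunif0 i hi
  have hqperm : ∀ q ∈ PySem.List.permutations (List.range implicants.length) implicants.length,
      q.Perm (List.range implicants.length) := by
    intro q hqmem
    exact PySem.List.perm_of_mem_permutations (by rw [List.length_range]; exact hqmem)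
  have hperm : PySem.List.permutations implicants implicants.length
      = (PySem.List.permutations (List.range implicants.length) implicants.length).map
          (List.map (fun i => implicants.getD i "")) := by
    have h1 := pv_perms_map (fun i => implicants.getD i "") implicants.length
      (List.range implicants.length)
    rw [show (List.range implicants.length).map (fun i => implicants.getD i "") = implicants from
      pv_map_getD_range implicants ""] at h1
    exact h1
  rw [hperm, List.foldl_map]
  have hkeyA : ∀ q, q.Perm (List.range implicants.length) →
      pvSliceKey table implicants sep (q.map (fun i => implicants.getD i ""))
        = pvKEY table implicants (pvWidthB table implicants) sep q := by
    intro q hq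
    rw [pvSliceKey]
    exact pv_A_perm_key table implicants (pvWidthB table implicants) sep hunif q hq
  have hkeyB : ∀ q, q.Perm (List.range implicants.length) →
      pvBKey table implicants sep q
        = pvKEY table implicants (pvWidthB table implicants) sep q := by
    intro q hq
    simp only [pvBKey, pvBaseB, pvMasksB]
    rw [pv_B_perm_key table implicants (pvWidthB table implicants) sep hunif q hq]
  have hlenB : ∀ s, ((PySem.Chars.count s [sep] : Int) + 1) = pvF sep s := by
    intro s
    rw [pvF, pv_split_count]
    push_cast
    ring
  have hfoldA : ∀ (P : List (List Nat)), (∀ q ∈ P, q.Perm (List.range implicants.length)) →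
      ∀ d, P.foldl (fun d q =>
          pvBodyA table implicants sep d (q.map (fun i => implicants.getD i ""))) d
        = P.foldl (fun d q =>
            d.insert (pvKEY table implicants (pvWidthB table implicants) sep q)
              (pvF sep (pvKEY table implicants (pvWidthB table implicants) sep q))) d := by
    intro P
    induction P with
    | nil => intro _ d; rfl
    | cons q P ihP =>
      intro hmem d
      rw [List.foldl_cons, List.foldl_cons,
        show pvBodyA table implicants sep d (q.map (fun i => implicants.getD i ""))
          = d.insert (pvKEY table implicants (pvWidthB table implicants) sep q)
              (pvF sep (pvKEY table implicants (pvWidthB table implicants) sep q)) from by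
          rw [pvBodyA, hkeyA q (hmem q List.mem_cons_self)]
          rfl]
      exact ihP (fun q' hq' => hmem q' (List.mem_cons_of_mem _ hq')) _
  have hfoldB : ∀ (P : List (List Nat)), (∀ q ∈ P, q.Perm (List.range implicants.length)) →
      ∀ best, P.foldl (pvBodyB table implicants sep) best
        = P.foldl (fun best q =>
            match best with
            | none => some (pvKEY table implicants (pvWidthB table implicants) sep q,
                pvF sep (pvKEY table implicants (pvWidthB table implicants) sep q))
            | some b =>
              if pvF sep (pvKEY table implicants (pvWidthB table implicants) sep q) < b.2 then
                some (pvKEY table implicants (pvWidthB table implicants) sep q,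
                  pvF sep (pvKEY table implicants (pvWidthB table implicants) sep q))
              else some b) best := by
    intro P
    induction P with
    | nil => intro _ best; rfl
    | cons q P ihP =>
      intro hmem best
      have hbody : pvBodyB table implicants sep best q
          = (match best with
            | none => some (pvKEY table implicants (pvWidthB table implicants) sep q,
                pvF sep (pvKEY table implicants (pvWidthB table implicants) sep q))
            | some b =>
              if pvF sep (pvKEY table implicants (pvWidthB table implicants) sep q) < b.2 then
                some (pvKEY table implicants (pvWidthB table implicants) sep q,
                  pvF sep (pvKEY table implicants (pvWidthB table implicants) sep q))
              else some b) := by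
        cases best with
        | none =>
          show some (pvBKey table implicants sep q,
              (PySem.Chars.count (pvBKey table implicants sep q) [sep] : Int) + 1) = _
          rw [hkeyB q (hmem q List.mem_cons_self), hlenB]
        | some b =>
          show (if ((PySem.Chars.count (pvBKey table implicants sep q) [sep] : Int) + 1) < b.2 then
              some (pvBKey table implicants sep q,
                (PySem.Chars.count (pvBKey table implicants sep q) [sep] : Int) + 1)
            else some b) = _
          rw [hkeyB q (hmem q List.mem_cons_self), hlenB]
      rw [List.foldl_cons, List.foldl_cons, hbody]
      exact ihP (fun q' hq' => hmem q' (List.mem_cons_of_mem _ hq')) _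
  rw [hfoldA _ hqperm, hfoldB _ hqperm]
  obtain ⟨p0, PR, hP⟩ : ∃ p0 PR,
      PySem.List.permutations (List.range implicants.length) implicants.length = p0 :: PR := by
    cases hcase : PySem.List.permutations (List.range implicants.length) implicants.length with
    | nil =>
      exfalso
      have := pv_perms_ne_nil (List.range implicants.length)
      rw [List.length_range] at this
      exact this hcase
    | cons p0 PR => exact ⟨p0, PR, rfl⟩
  rw [hP]
  set W := pvWidthB table implicants with hWdef
  set KEY := pvKEY table implicants W sep with hKEYdef
  set F := pvF sep with hFdef
  set D := (p0 :: PR).foldl (fun d q => d.insert (KEY q) (F (KEY q))) PySem.Dict.empty with hDdef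
  -- A side
  rw [pv_find_minim_unfold]
  have hkeys : D.keys = PySem.Set.ofList ((p0 :: PR).map KEY) := by
    rw [hDdef, PySem.Dict.keys_foldl_insert_key]
    rfl
  have hget : ∀ k, k ∈ (p0 :: PR).map KEY → D.getD k 0 = F k := by
    intro k hk
    rw [hDdef, pv_dict_getD F KEY (p0 :: PR) PySem.Dict.empty k 0, if_pos hk]
  have hhead : (PySem.Set.ofList ((p0 :: PR).map KEY)).getD 0 [] = KEY p0 := by
    rw [List.map_cons]
    exact pv_ofList_head _ _ _
  rw [hkeys, hhead, hget (KEY p0) (by simp)]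
  rw [PySem.List.foldl_congr_mem (PySem.Set.ofList ((p0 :: PR).map KEY))
    (fun mm key => if D.getD key 0 < mm.1 then (D.getD key 0, key) else mm)
    (fun mm key => if F key < mm.1 then (F key, key) else mm)
    ((F (KEY p0), KEY p0))
    (by
      intro mm key hk
      have hk' : key ∈ (p0 :: PR).map KEY := (PySem.Set.mem_ofList _ _).mp hk
      show (if D.getD key 0 < mm.1 then (D.getD key 0, key) else mm)
        = (if F key < mm.1 then (F key, key) else mm)
      rw [hget key hk'])]
  have hfold : (PySem.Set.ofList ((p0 :: PR).map KEY)).foldl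
      (fun mm key => if F key < mm.1 then (F key, key) else mm) (F (KEY p0), KEY p0)
      = pvFm F (F (KEY p0), KEY p0) (PR.map KEY) := by
    rw [show (PySem.Set.ofList ((p0 :: PR).map KEY)).foldl
        (fun mm key => if F key < mm.1 then (F key, key) else mm) (F (KEY p0), KEY p0)
        = pvFm F (F (KEY p0), KEY p0) (PySem.Set.ofList ((p0 :: PR).map KEY)) from rfl]
    rw [← pv_fm_ofList]
    rw [List.map_cons, pvFm, List.foldl_cons, if_neg (lt_irrefl _), ← pvFm]
  rw [hfold]
  -- B side
  conv_rhs => rw [List.foldl_cons]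
  have hinit : (match (none : Option (List Char × Int)) with
      | none => some (KEY p0, F (KEY p0))
      | some b => if F (KEY p0) < b.2 then some (KEY p0, F (KEY p0)) else some b)
      = some (KEY p0, F (KEY p0)) := rfl
  rw [hinit, pv_opt_fold KEY F PR (KEY p0)]

-- ===== VERDICT (by name-- ===== VERDICT (by name-- ===== VERDICT (by name: the statement is the Claim_ definition above) =====
theorem calc_table_minim_snf_spec : Claim_equal_calc_table_minim_snf := by
  intro what_snf table implicants _ hpre
  obtain ⟨hws, _, hunif0⟩ := hpre
  unfold Spec_calc_table_minim_snf
  rcases hws with rfl | rfl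
  · exact pv_main_core table implicants '&' hunif0
  · exact pv_main_core table implicants '|' hunif0
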